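-- pv_equiv track=rewrite | github.com/MBkkt/Homework | Python/_09_18/1.4.21.py | longest_plato
-- ===== SOURCE A (Python) =====
-- def longest_plato(a):
--     mx = [0, -1, -1]  # длина, начало и конец плато
--     N = len(a)
--     for i in range(1, N - 1):
--         if a[i - 1] < a[i]:
--             for j in range(i + 1, N):  # лучше while
--                 if a[i] < a[j]:
--                     break
--                 if a[i] > a[j]:
--                     mx = [j - i, i, j]
--                     break
--     return mx
-- ===== SOURCE B (Python) =====
-- def longest_plato(a):
--     mx = [0, -1, -1]
--     N = len(a)
--     s = 0
--     while s < N: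
--         e = s + 1
--         while e < N and not (a[s] < a[e]) and not (a[s] > a[e]):
--             e += 1
--         if s >= 1 and a[s - 1] < a[s] and e < N and a[s] > a[e]:
--             mx = [e - s, s, e]
--         s = e
--     return mx
-- ===== Notes on version B (the rewrite author's own statement) =====
-- stated objective: alternative
-- what changed: B replaces A's for-loop over every index with an inner rescanning loop by a single run-jumping while loop: it finds the end of each maximal equal run once, checks rise-before/fall-after at the run boundaries, and jumps straight to the next run start.
import Mathlib
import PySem

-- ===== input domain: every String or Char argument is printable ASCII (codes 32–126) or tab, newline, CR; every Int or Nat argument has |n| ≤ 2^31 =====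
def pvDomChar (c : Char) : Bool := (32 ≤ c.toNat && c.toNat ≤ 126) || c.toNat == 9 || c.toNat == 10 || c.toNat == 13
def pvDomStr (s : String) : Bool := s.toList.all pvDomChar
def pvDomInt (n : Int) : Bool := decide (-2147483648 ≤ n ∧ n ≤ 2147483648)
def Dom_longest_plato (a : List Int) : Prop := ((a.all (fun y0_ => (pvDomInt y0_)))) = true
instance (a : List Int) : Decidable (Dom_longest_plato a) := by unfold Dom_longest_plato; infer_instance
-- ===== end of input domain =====

-- B replaces A's index loop + inner rescanning loop by one run-jumping while loop
-- (find each maximal equal run once, check rise before / fall after, jump to the next run);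
-- objective: alternative decomposition, same asymptotic cost.

-- ===== PORT A =====
-- inner 'for j in range(i+1, N)' with its two breaks
def pvA_inner (a : List Int) (i : Int) (mx : List Int) : List Int → List Int
  | [] => mx
  | j :: js =>
    if PySem.List.pyGetD a i 0 < PySem.List.pyGetD a j 0 then mx
    else if PySem.List.pyGetD a i 0 > PySem.List.pyGetD a j 0 then [j - i, i, j]
    else pvA_inner a i mx js

-- body of the outer 'for i in range(1, N-1)'
def pvA_step (a : List Int) (mx : List Int) (i : Int) : List Int :=
  if PySem.List.pyGetD a (i - 1) 0 < PySem.List.pyGetD a i 0 then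
    pvA_inner a i mx (PySem.List.pyRange (i + 1) (PySem.List.len a) 1)
  else mx

def longest_plato (a : List Int) : List Int :=
  (PySem.List.pyRange 1 (PySem.List.len a - 1) 1).foldl (pvA_step a) [0, -1, -1]

-- ===== PORT B =====
-- inner 'while e < N and not (a[s] < a[e]) and not (a[s] > a[e]): e += 1'  (fuel makes it total)
def pvB_runEnd (a : List Int) (s : Int) : Int → Nat → Int
  | e, 0 => e
  | e, fuel + 1 =>
    if e < PySem.List.len a ∧ ¬ (PySem.List.pyGetD a s 0 < PySem.List.pyGetD a e 0)
        ∧ ¬ (PySem.List.pyGetD a s 0 > PySem.List.pyGetD a e 0) then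
      pvB_runEnd a s (e + 1) fuel
    else e

-- outer 'while s < N' loop
def pvB_loop (a : List Int) : List Int → Int → Nat → List Int
  | mx, _, 0 => mx
  | mx, s, fuel + 1 =>
    if s < PySem.List.len a then
      let e := pvB_runEnd a s (s + 1) fuel
      let mx' :=
        if 1 ≤ s ∧ PySem.List.pyGetD a (s - 1) 0 < PySem.List.pyGetD a s 0
            ∧ e < PySem.List.len a ∧ PySem.List.pyGetD a s 0 > PySem.List.pyGetD a e 0 then
          [e - s, s, e]
        else mx
      pvB_loop a mx' e fuel
    else mx

def longest_plato_alt (a : List Int) : List Int :=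
  pvB_loop a [0, -1, -1] 0 (a.length + 1)

-- ===== PRECONDITION & SPEC =====
def Spec_longest_plato (a : List Int) (out : List Int) : Prop := out = longest_plato_alt a
instance (a : List Int) (out : List Int) : Decidable (Spec_longest_plato a out) := by unfold Spec_longest_plato; infer_instance

-- ===== CLAIM (what is proved, stated in full; the proofs are below) =====
def Claim_equal_longest_plato : Prop := ∀ (a : List Int), Dom_longest_plato a → Spec_longest_plato a (longest_plato a)

-- ===== LEMMAS AND PROOFS =====

-- pvB_runEnd returns the first index E ≥ e with a[E] ≠ a[s] (or N), given enough fuel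
lemma runEnd_props (a : List Int) (s : Int) :
    ∀ (fuel : Nat) (e : Int),
      s < e → e ≤ (a.length : Int) →
      (((a.length : Int) - e).toNat ≤ fuel) →
      (∀ j, s < j → j < e → PySem.List.pyGetD a j 0 = PySem.List.pyGetD a s 0) →
      (e ≤ pvB_runEnd a s e fuel ∧ pvB_runEnd a s e fuel ≤ (a.length : Int)) ∧
      (∀ j, s < j → j < pvB_runEnd a s e fuel →
          PySem.List.pyGetD a j 0 = PySem.List.pyGetD a s 0) ∧
      (pvB_runEnd a s e fuel < (a.length : Int) →
          PySem.List.pyGetD a (pvB_runEnd a s e fuel) 0 ≠ PySem.List.pyGetD a s 0) := by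
  intro fuel
  induction fuel with
  | zero =>
    intro e hse heN hf hrun
    simp only [pvB_runEnd]
    refine ⟨⟨le_refl _, heN⟩, hrun, ?_⟩
    intro hlt
    omega
  | succ f ih =>
    intro e hse heN hf hrun
    simp only [pvB_runEnd, PySem.List.len_eq]
    split_ifs with h
    · obtain ⟨heN', hnlt, hngt⟩ := h
      have heq : PySem.List.pyGetD a e 0 = PySem.List.pyGetD a s 0 := by omega
      obtain ⟨⟨h1, h2⟩, h3, h4⟩ := ih (e + 1) (by omega) (by omega) (by omega)
        (by intro j hj1 hj2
            by_cases hje : j = e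
            · rw [hje]; exact heq
            · exact hrun j hj1 (by omega))
      exact ⟨⟨by omega, h2⟩, h3, h4⟩
    · refine ⟨⟨le_refl _, heN⟩, hrun, ?_⟩
      intro hlt hc
      exact h ⟨hlt, by omega, by omega⟩

-- A's inner scan from any j in (s, E] yields B's boundary test
lemma inner_eq (a : List Int) (s E : Int) (mx : List Int)
    (hE2 : ∀ j, s < j → j < E → PySem.List.pyGetD a j 0 = PySem.List.pyGetD a s 0)
    (hEN : E ≤ (a.length : Int))
    (hE3 : E < (a.length : Int) → PySem.List.pyGetD a E 0 ≠ PySem.List.pyGetD a s 0) :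
    ∀ (k : Nat) (j : Int), s < j → j ≤ E → (((a.length : Int) - j).toNat ≤ k) →
      pvA_inner a s mx (PySem.List.pyRange j (a.length : Int) 1) =
        (if E < (a.length : Int) ∧ PySem.List.pyGetD a s 0 > PySem.List.pyGetD a E 0 then
          [E - s, s, E] else mx) := by
  intro k
  induction k with
  | zero =>
    intro j hsj hjE hk
    rw [PySem.List.pyRange_one_eq_nil (by omega)]
    simp only [pvA_inner]
    rw [if_neg (by omega)]
  | succ k ih =>
    intro j hsj hjE hk
    by_cases hjN : ((a.length : Int)) ≤ j
    · rw [PySem.List.pyRange_one_eq_nil hjN]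
      simp only [pvA_inner]
      rw [if_neg (by omega)]
    · rw [PySem.List.pyRange_one_cons (by omega)]
      simp only [pvA_inner]
      by_cases hjE' : j < E
      · have heq := hE2 j hsj hjE'
        rw [if_neg (by omega), if_neg (by omega)]
        exact ih (j + 1) (by omega) (by omega) (by omega)
      · have hjEeq : j = E := by omega
        subst hjEeq
        have hne := hE3 (by omega)
        by_cases hlt : PySem.List.pyGetD a s 0 < PySem.List.pyGetD a j 0
        · rw [if_pos hlt, if_neg (by omega)]
        · rw [if_neg hlt, if_pos (by omega), if_pos (by omega)]

-- indices strictly inside a run do not change mx in A's outer fold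
lemma fold_noop (a : List Int) (s E : Int)
    (hE2 : ∀ j, s < j → j < E → PySem.List.pyGetD a j 0 = PySem.List.pyGetD a s 0) :
    ∀ (k : Nat) (u v : Int) (mx : List Int), ((v - u).toNat ≤ k) →
      s < u → v ≤ E →
      (PySem.List.pyRange u v 1).foldl (pvA_step a) mx = mx := by
  intro k
  induction k with
  | zero =>
    intro u v mx hk hsu hvE
    rw [PySem.List.pyRange_one_eq_nil (by omega)]
    simp
  | succ k ih =>
    intro u v mx hk hsu hvE
    by_cases huv : u < v
    · rw [PySem.List.pyRange_one_cons huv]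
      simp only [List.foldl_cons]
      have hmx : pvA_step a mx u = mx := by
        have h1 : PySem.List.pyGetD a (u - 1) 0 = PySem.List.pyGetD a s 0 := by
          by_cases hu1 : u - 1 = s
          · rw [hu1]
          · exact hE2 (u - 1) (by omega) (by omega)
        have h2 : PySem.List.pyGetD a u 0 = PySem.List.pyGetD a s 0 :=
          hE2 u hsu (by omega)
        unfold pvA_step
        rw [if_neg (by omega)]
      rw [hmx]
      exact ih (u + 1) v mx (by omega) (by omega) hvE
    · rw [PySem.List.pyRange_one_eq_nil (by omega)]
      simp

-- main invariant: A's remaining fold from position max 1 s equals B's loop from s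
lemma main_inv (a : List Int) :
    ∀ (fuel : Nat) (s : Int) (mx : List Int), 0 ≤ s →
      (((a.length : Int) - s).toNat + 1 ≤ fuel) →
      (PySem.List.pyRange (max 1 s) ((a.length : Int) - 1) 1).foldl (pvA_step a) mx =
        pvB_loop a mx s fuel := by
  intro fuel
  induction fuel with
  | zero => intro s mx h0 hf; omega
  | succ fuel ih =>
    intro s mx h0 hf
    have hlen : PySem.List.len a = (a.length : Int) := PySem.List.len_eq a
    by_cases hsN : s < (a.length : Int)
    · simp only [pvB_loop]
      rw [if_pos (show s < PySem.List.len a by rw [hlen]; exact hsN)]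
      set E := pvB_runEnd a s (s + 1) fuel with hEdef
      obtain ⟨⟨hE1, hEN⟩, hE2, hE3⟩ :=
        runEnd_props a s fuel (s + 1) (by omega) (by omega) (by omega)
          (by intro j h1 h2; omega)
      rw [← hEdef] at hE1 hEN hE2 hE3
      -- the shared tail: noop over the rest of the run, then the IH at E
      have tailA : ∀ (m : List Int),
          (PySem.List.pyRange (s + 1) ((a.length : Int) - 1) 1).foldl (pvA_step a) m =
            pvB_loop a m E fuel := by
        intro m
        have hIH := ih E m (by omega) (by omega)
        by_cases hEN1 : E ≤ (a.length : Int) - 1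
        · rw [PySem.List.pyRange_one_append (s + 1) E ((a.length : Int) - 1)
            (by omega) hEN1, List.foldl_append,
            fold_noop a s E hE2 (E - (s + 1)).toNat (s + 1) E m (by omega)
              (by omega) (le_refl _)]
          rw [max_eq_right (by omega)] at hIH
          exact hIH
        · rw [fold_noop a s E hE2 (((a.length : Int) - 1) - (s + 1)).toNat (s + 1)
            ((a.length : Int) - 1) m (by omega) (by omega) (by omega)]
          rw [PySem.List.pyRange_one_eq_nil (by omega)] at hIH
          simpa using hIH
      by_cases hguard : 1 ≤ s ∧ PySem.List.pyGetD a (s - 1) 0 < PySem.List.pyGetD a s 0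
          ∧ E < PySem.List.len a ∧ PySem.List.pyGetD a s 0 > PySem.List.pyGetD a E 0
      · rw [if_pos hguard]
        obtain ⟨hs1, hrise, hEltN, hfall⟩ := hguard
        rw [hlen] at hEltN
        have hsN1 : s < (a.length : Int) - 1 := by omega
        rw [max_eq_right hs1, PySem.List.pyRange_one_cons hsN1]
        simp only [List.foldl_cons]
        have hstep : pvA_step a mx s = [E - s, s, E] := by
          unfold pvA_step
          rw [if_pos hrise, hlen,
            inner_eq a s E mx hE2 hEN hE3 (((a.length : Int) - (s + 1)).toNat)
              (s + 1) (by omega) hE1 (by omega),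
            if_pos ⟨hEltN, hfall⟩]
        rw [hstep]
        exact tailA [E - s, s, E]
      · rw [if_neg hguard]
        rw [hlen] at hguard
        by_cases hs1 : 1 ≤ s
        · by_cases hsN1 : s < (a.length : Int) - 1
          · rw [max_eq_right hs1, PySem.List.pyRange_one_cons hsN1]
            simp only [List.foldl_cons]
            have hstep : pvA_step a mx s = mx := by
              unfold pvA_step
              by_cases hrise : PySem.List.pyGetD a (s - 1) 0 < PySem.List.pyGetD a s 0
              · rw [if_pos hrise, hlen,
                  inner_eq a s E mx hE2 hEN hE3 (((a.length : Int) - (s + 1)).toNat)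
                    (s + 1) (by omega) hE1 (by omega),
                  if_neg (by intro hc; exact hguard ⟨hs1, hrise, hc.1, hc.2⟩)]
              · rw [if_neg hrise]
            rw [hstep]
            exact tailA mx
          · -- s = N - 1: both ranges are empty
            have h := tailA mx
            rw [PySem.List.pyRange_one_eq_nil (by omega)] at h
            simp only [List.foldl_nil] at h
            rw [max_eq_right hs1, PySem.List.pyRange_one_eq_nil (by omega)]
            simpa using h
        · -- s = 0: no step at s, the fold starts at 1 = s + 1
          have hs0 : s = 0 := by omega
          subst hs0
          have h := tailA mx
          rw [max_eq_left (by omega : (0:Int) ≤ 1)]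
          simpa using h
    · simp only [pvB_loop]
      rw [if_neg (show ¬ s < PySem.List.len a by rw [hlen]; exact hsN),
        PySem.List.pyRange_one_eq_nil (by omega)]
      simp

-- ===== VERDICT (by name: the statement is the Claim_ definition above) =====
theorem longest_plato_spec : Claim_equal_longest_plato := by
  intro a _
  unfold Spec_longest_plato longest_plato longest_plato_alt
  rw [PySem.List.len_eq]
  have h := main_inv a (a.length + 1) 0 [0, -1, -1] (le_refl _) (by omega)
  rw [max_eq_left (by omega : (0:Int) ≤ 1)] at h
  exact h
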